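-- pv_equiv track=rewrite | github.com/jspaezp/elfragmentador | transprosit/annotate.py | peptide_parser
-- ===== SOURCE A (Python) =====
-- from typing import Iterator
--
-- def peptide_parser(p: str) -> Iterator[str]:
--     """
--     Parses maxquant formatted peptide strings
--
--     Examples
--     ========
--     >>> list(peptide_parser("AAACC"))
--     ['A', 'A', 'A', 'C', 'C']
--     >>> list(peptide_parser("AAAM(ox)CC"))
--     ['A', 'A', 'A', 'M(ox)', 'C', 'C']
--     >>> list(peptide_parser("AAAM[+16]CC"))
--     ['A', 'A', 'A', 'M[+16]', 'C', 'C']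
--     """
--
--     ANNOTATIONS = "[](){}"
--
--     if p[0] in ANNOTATIONS:
--         raise ValueError(f"sequence starts with '{p[0]}'")
--     n = len(p)
--     i = 0
--     while i < n:
--         if p[i] == "_":
--             i += 1
--             continue
--         elif i + 1 < n and p[i + 1] in ANNOTATIONS:
--             p_ = p[i + 2 :]
--             annots = [x for x in ANNOTATIONS if x in p_]
--             nexts = []
--             for an in annots:
--                 nexts.append(p_.index(an))
--             j = min(nexts)
--             offset = i + j + 3
--             yield p[i:offset]
--             i = offset
--         else:
--             yield p[i]
--             i += 1
-- ===== SOURCE B (Python) =====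
-- def peptide_parser(p):
--     """Scans forward to the next annotation char in place, instead of rebuilding
--     and re-scanning the suffix per bracket."""
--     ANNOTATIONS = "[](){}"
--     if p[0] in ANNOTATIONS:
--         raise ValueError(f"sequence starts with '{p[0]}'")
--     n = len(p)
--     i = 0
--     while i < n:
--         c = p[i]
--         if c == "_":
--             i += 1
--         elif i + 1 < n and p[i + 1] in ANNOTATIONS:
--             j = i + 2
--             while j < n and p[j] not in ANNOTATIONS:
--                 j += 1
--             if j == n:
--                 raise ValueError("annotation is never closed")
--             yield p[i : j + 1]
--             i = j + 1
--         else: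
--             yield c
--             i += 1
-- ===== Notes on version B (the rewrite author's own statement) =====
-- stated objective: alternative
-- what changed: Per bracket, A rebuilds the whole suffix and scans it once per annotation character (list comprehension + repeated .index) to find the closer; B instead advances a single index forward to the next annotation character, one pass with no suffix copies.
import Mathlib
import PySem

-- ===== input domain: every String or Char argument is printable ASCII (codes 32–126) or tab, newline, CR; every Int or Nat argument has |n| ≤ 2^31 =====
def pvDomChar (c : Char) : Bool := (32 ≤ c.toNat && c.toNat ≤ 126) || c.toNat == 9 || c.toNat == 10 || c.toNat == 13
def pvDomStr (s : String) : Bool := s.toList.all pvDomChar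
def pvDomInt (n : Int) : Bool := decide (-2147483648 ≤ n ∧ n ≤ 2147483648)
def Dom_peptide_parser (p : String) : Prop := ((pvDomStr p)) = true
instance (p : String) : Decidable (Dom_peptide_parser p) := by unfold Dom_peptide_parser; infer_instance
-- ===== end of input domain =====

-- B replaces A's per-bracket suffix rebuild-and-rescan (comprehension + repeated .index)
-- by a single forward scan to the next annotation char. Equal wherever A returns.

-- ===== PORT A =====

-- ANNOTATIONS = "[](){}"
def pvAnn : List Char := ['[', ']', '(', ')', '{', '}']

def pvIsAnn (c : Char) : Bool := pvAnn.contains c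

-- the while-loop of A; `none` = the ValueError raised by `min([])` on an unclosed annotation
def goA (cs : List Char) (n : Nat) (i : Nat) : Option (List String) :=
  if h : i < n then
    if cs.getD i ' ' = '_' then goA cs n (i + 1)
    else if i + 1 < n ∧ pvIsAnn (cs.getD (i + 1) ' ') = true then
      let p_ := cs.drop (i + 2)                                   -- p_ = p[i+2:]
      let annots := pvAnn.filter (fun x => p_.contains x)         -- [x for x in ANNOTATIONS if x in p_]
      let nexts := annots.map (fun an => (PySem.List.index? p_ an).getD 0)  -- p_.index(an); always present
      match PySem.List.min? nexts (fun x => x) with               -- j = min(nexts); none = ValueError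
      | none => none
      | some j =>
        let offset := i + j + 3
        match goA cs n offset with
        | none => none
        | some rest => some (String.mk ((cs.drop i).take (offset - i)) :: rest)  -- yield p[i:offset]
    else
      match goA cs n (i + 1) with
      | none => none
      | some rest => some (String.mk [cs.getD i ' '] :: rest)     -- yield p[i]
  else some []
termination_by n - i
decreasing_by all_goals omega

def peptide_parser (p : String) : List String :=
  match p.toList with
  | [] => []                                -- p[0] raises IndexError; excluded by Pre_
  | c :: _ =>
    if pvIsAnn c then []                    -- explicit ValueError; excluded by Pre_
    else (goA p.toList p.toList.length 0).getD []   -- unclosed annotation ValueError; excluded by Pre_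

-- ===== PORT B =====

-- inner while-loop of B: first index ≥ j holding an annotation char
def scanB (cs : List Char) (n : Nat) (j : Nat) : Option Nat :=
  if h : j < n then
    if pvIsAnn (cs.getD j ' ') then some j else scanB cs n (j + 1)
  else none
termination_by n - j

theorem scanB_some_ge (cs : List Char) (n s j : Nat) (h : scanB cs n s = some j) : s ≤ j ∧ j < n := by
  fun_induction scanB cs n s with
  | case1 s hs hA => simp_all
  | case2 s hs hA ih => have := ih h; omega
  | case3 s hs => simp_all

def goB (cs : List Char) (n : Nat) (i : Nat) : Option (List String) :=
  if h : i < n then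
    let c := cs.getD i ' '
    if c = '_' then goB cs n (i + 1)
    else if i + 1 < n ∧ pvIsAnn (cs.getD (i + 1) ' ') = true then
      match hs : scanB cs n (i + 2) with
      | none => none                                              -- ValueError: annotation never closed
      | some j =>
        match goB cs n (j + 1) with
        | none => none
        | some rest => some (String.mk ((cs.drop i).take (j + 1 - i)) :: rest)  -- yield p[i:j+1]
    else
      match goB cs n (i + 1) with
      | none => none
      | some rest => some (String.mk [c] :: rest)                 -- yield c
  else some []
termination_by n - i
decreasing_by
  · omega
  · have := scanB_some_ge cs n (i + 2) j hs; omega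
  · omega

def peptide_parser_alt (p : String) : List String :=
  match p.toList with
  | [] => []
  | c :: _ =>
    if pvIsAnn c then []
    else (goB p.toList p.toList.length 0).getD []

-- ===== PRECONDITION & SPEC =====
-- Pre_ excludes exactly the inputs on which the Python A raises: the empty string (IndexError),
-- a string starting with an annotation char (explicit ValueError), and a string with an opened
-- annotation group that is never closed (ValueError from min([])); B raises ValueError there too.
-- pvWf is the grammar of parsable strings: residues, '_' fillers, and closed annotation groups.
-- each grammar step consumes at least one character, so a fuel of the string's
-- length makes the recursion structural (and hence kernel-evaluable by `decide`)
def pvWf : Nat → List Char → Bool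
  | _, [] => true
  | 0, _ :: _ => false
  | fuel + 1, '_' :: rest => pvWf fuel rest
  | _ + 1, [_] => true
  | fuel + 1, _ :: d :: rest =>
    if pvIsAnn d then
      match rest.findIdx? pvIsAnn with
      | some t => pvWf fuel (rest.drop (t + 1))
      | none => false
    else pvWf fuel (d :: rest)

def Pre_peptide_parser (p : String) : Prop :=
  p.toList ≠ [] ∧ pvIsAnn (p.toList.headD ' ') = false ∧ pvWf p.toList.length p.toList = true
instance (p : String) : Decidable (Pre_peptide_parser p) := by unfold Pre_peptide_parser; infer_instance

def pvWitness_peptide_parser : String := "AM(ox)C"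

def Spec_peptide_parser (p : String) (out : List String) : Prop := out = peptide_parser_alt p
instance (p : String) (out : List String) : Decidable (Spec_peptide_parser p out) := by unfold Spec_peptide_parser; infer_instance

-- ===== CLAIM (what is proved, stated in full; the proofs are below) =====
def Claim_equal_peptide_parser : Prop := ∀ (p : String), Dom_peptide_parser p → Pre_peptide_parser p → Spec_peptide_parser p (peptide_parser p)

-- ===== LEMMAS AND PROOFS =====


theorem index?_getD_of_first (l : List Char) (t : Nat) (ht : t < l.length)
    (hp : pvIsAnn l[t] = true) (hmin : ∀ j (hj : j < t), ¬ pvIsAnn (l[j]'(by omega)) = true) :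
    PySem.List.index? l l[t] = some t := by
  rw [PySem.List.index?_eq_some_iff]
  refine ⟨l.take t, l.drop (t + 1), ?_, by simp [List.length_take]; omega, ?_⟩
  · conv_lhs => rw [← List.take_append_drop t l]
    rw [List.drop_eq_getElem_cons ht]
  · intro hmem
    obtain ⟨j, hj, hEq⟩ := List.mem_take_iff_getElem.mp hmem
    have hjt : j < t := by omega
    have := hmin j hjt
    rw [hEq, hp] at this
    exact this rfl

theorem index?_ge_first (l : List Char) (t : Nat) (ht : t < l.length)
    (hmin : ∀ j (hj : j < t), ¬ pvIsAnn (l[j]'(by omega)) = true)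
    (an : Char) (han : an ∈ pvAnn) (k : Nat)
    (hk : PySem.List.index? l an = some k) : t ≤ k := by
  rw [PySem.List.index?_eq_some_iff] at hk
  obtain ⟨pre, suf, hl, hlen, -⟩ := hk
  by_contra hlt
  push_neg at hlt
  have hkl : k < l.length := by rw [hl]; simp; omega
  have hlk : l[k] = an := by
    subst hl hlen
    simp [List.getElem_append_right (Nat.le_refl pre.length)]
  have h2 := hmin k hlt
  rw [hlk] at h2
  exact h2 (by simpa [pvIsAnn] using han)


-- A's min-over-first-occurrences equals the index of the first annotation char
theorem minIdx_eq_findIdx (l : List Char) :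
    PySem.List.min?
      ((pvAnn.filter (fun x => l.contains x)).map (fun an => (PySem.List.index? l an).getD 0))
      (fun x => x) = l.findIdx? pvIsAnn := by
  cases hf : l.findIdx? pvIsAnn with
  | none =>
    rw [List.findIdx?_eq_none_iff] at hf
    have hnil : pvAnn.filter (fun x => l.contains x) = [] := by
      rw [List.filter_eq_nil_iff]
      intro a ha hc
      have hal : a ∈ l := by simpa using hc
      have h2 := hf a hal
      simp [pvIsAnn, ha] at h2
    rw [hnil]
    simp [PySem.List.min?]
  | some t =>
    rw [List.findIdx?_eq_some_iff_getElem] at hf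
    obtain ⟨ht, hp, hmin⟩ := hf
    have ha0ann : l[t] ∈ pvAnn := by simpa [pvIsAnn] using hp
    have ha0l : l[t] ∈ l := List.getElem_mem ht
    set nexts := (pvAnn.filter (fun x => l.contains x)).map (fun an => (PySem.List.index? l an).getD 0) with hn
    have htmem : t ∈ nexts := by
      rw [hn]
      refine List.mem_map.mpr ⟨l[t], ?_, ?_⟩
      · exact List.mem_filter.mpr ⟨ha0ann, by simpa using ha0l⟩
      · rw [index?_getD_of_first l t ht hp hmin]; rfl
    have hlb : ∀ v ∈ nexts, t ≤ v := by
      intro v hv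
      rw [hn] at hv
      obtain ⟨an, hanf, hval⟩ := List.mem_map.mp hv
      obtain ⟨hanA, hanl⟩ := List.mem_filter.mp hanf
      have hanl' : an ∈ l := by simpa using hanl
      obtain ⟨k, hk⟩ := Option.isSome_iff_exists.mp
        (((PySem.List.index?_isSome_iff l an).mpr hanl'))
      have := index?_ge_first l t ht hmin an hanA k hk
      rw [hk] at hval
      simp at hval
      omega
    have hne : nexts ≠ [] := by intro h; rw [h] at htmem; simp at htmem
    obtain ⟨m, hm⟩ : ∃ m, PySem.List.min? nexts (fun x => x) = some m := by
      cases h : PySem.List.min? nexts (fun x => x) with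
      | none => exact absurd ((PySem.List.min?_eq_none_iff nexts _).mp h) hne
      | some m => exact ⟨m, rfl⟩
    have hmmem := PySem.List.min?_mem hm
    have hmle : m ≤ t := PySem.List.min?_isMin hm t htmem
    have htle : t ≤ m := hlb m hmmem
    rw [hm]
    congr 1
    omega

-- B's scan equals the index of the first annotation char, shifted by the start position
theorem scanB_eq_findIdx (cs : List Char) (s : Nat) :
    scanB cs cs.length s = ((cs.drop s).findIdx? pvIsAnn).map (s + ·) := by
  fun_induction scanB cs cs.length s with
  | case1 s hs hA =>
    have hA' : pvIsAnn cs[s] = true := by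
      simpa [List.getD, List.getElem?_eq_getElem hs] using hA
    rw [List.drop_eq_getElem_cons hs, List.findIdx?_cons]
    simp [hA']
  | case2 s hs hA ih =>
    have hA' : pvIsAnn cs[s] = false := by
      simpa [List.getD, List.getElem?_eq_getElem hs] using hA
    rw [List.drop_eq_getElem_cons hs, List.findIdx?_cons]
    rw [hA']
    simp only [ih, Option.map_map]
    cases h2 : (cs.drop (s+1)).findIdx? pvIsAnn <;> simp [Function.comp] <;> omega
  | case3 s hs =>
    rw [List.drop_eq_nil_iff.mpr (by omega)]
    simp

-- B's inner scan, expressed through A's min-of-first-occurrences computation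
theorem scanB_eq_min (cs : List Char) (i : Nat) :
    scanB cs cs.length (i + 2) =
      (PySem.List.min?
        ((pvAnn.filter (fun x => (cs.drop (i + 2)).contains x)).map
          (fun an => (PySem.List.index? (cs.drop (i + 2)) an).getD 0))
        (fun x => x)).map (fun j => i + 2 + j) := by
  rw [scanB_eq_findIdx, minIdx_eq_findIdx]

theorem goA_eq_goB (cs : List Char) (i : Nat) : goA cs cs.length i = goB cs cs.length i := by
  fun_induction goA cs cs.length i with
  | case1 i h hu ih =>
    rw [goB]
    simp only [dif_pos h, if_pos hu]
    exact ih
  | case2 i h hu h2 p_ annots nexts hm =>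
    have hm' : PySem.List.min?
        ((pvAnn.filter (fun x => (cs.drop (i + 2)).contains x)).map
          (fun an => (PySem.List.index? (cs.drop (i + 2)) an).getD 0))
        (fun x => x) = none := hm
    rw [goB]
    simp only [dif_pos h, if_neg hu, if_pos h2]
    rw [scanB_eq_min, hm']
    rfl
  | case3 i h hu h2 p_ annots nexts j hm offset hgo ih =>
    have hm' : PySem.List.min?
        ((pvAnn.filter (fun x => (cs.drop (i + 2)).contains x)).map
          (fun an => (PySem.List.index? (cs.drop (i + 2)) an).getD 0))
        (fun x => x) = some j := hm
    have hgo' : goA cs cs.length (i + j + 3) = none := hgo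
    have ih' : goA cs cs.length (i + j + 3) = goB cs cs.length (i + j + 3) := ih
    rw [goB]
    simp only [dif_pos h, if_neg hu, if_pos h2]
    rw [scanB_eq_min, hm']
    simp only [Option.map_some]
    have h31 : i + 2 + j + 1 = i + j + 3 := by omega
    rw [h31, ← ih', hgo']
  | case4 i h hu h2 p_ annots nexts j hm offset rest hgo ih =>
    have hm' : PySem.List.min?
        ((pvAnn.filter (fun x => (cs.drop (i + 2)).contains x)).map
          (fun an => (PySem.List.index? (cs.drop (i + 2)) an).getD 0))
        (fun x => x) = some j := hm
    have hgo' : goA cs cs.length (i + j + 3) = some rest := hgo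
    have ih' : goA cs cs.length (i + j + 3) = goB cs cs.length (i + j + 3) := ih
    rw [goB]
    simp only [dif_pos h, if_neg hu, if_pos h2]
    rw [scanB_eq_min, hm']
    simp only [Option.map_some]
    have h31 : i + 2 + j + 1 = i + j + 3 := by omega
    rw [h31, ← ih', hgo']
  | case5 i h hu h2 hgo ih =>
    rw [goB]
    simp only [dif_pos h, if_neg hu, if_neg h2]
    rw [← ih, hgo]
  | case6 i h hu h2 rest hgo ih =>
    rw [goB]
    simp only [dif_pos h, if_neg hu, if_neg h2]
    rw [← ih, hgo]
  | case7 i h =>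
    rw [goB]
    simp only [dif_neg h]

-- ===== VERDICT (by name: the statement is the Claim_ definition above) =====
theorem peptide_parser_spec : Claim_equal_peptide_parser := by
  intro p _ _
  unfold Spec_peptide_parser peptide_parser peptide_parser_alt
  cases p.toList with
  | nil => rfl
  | cons c t => simp only [goA_eq_goB]
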